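-- pv_equiv track=rewrite | github.com/NoemieCoulon/Key-Hunter | hunter.py | leakage_simu
-- ===== SOURCE A (Python) =====
-- def bin_on_nb_bits(nb_bits,l_in):
--     #l is a list of str which represents a binary int ex: "0b101"
--
--     l_out=[]
--
--     for e in l_in:
--         e=e[2:] #remove "0b" at the beginning of the int, ex: 0b101 ==> 101
--         if nb_bits>len(e):
--                 e=(nb_bits-len(e))*"0"+e #put the right number of zeros to have nb_bits bits
--                                          # ex: nb_bits=8, "101" ==> "00000101"
--         if len(e)>nb_bits: #the int is already written on more than nb_bits
--             e=e[-nb_bits:] # keep only the first nb_bits; ex: "100000101" ==> "00000101"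
--         l_out.append(e)
--
--     return l_out #l_out is a list of str which represents a binary int on nb_bits ex: "00000101"
--
-- def function_add(nb_max,nb_bits,nb_sum):
--     #nb_sum is whatever the key or the hypothetical key
--     l_sum=[]
--
--     for i in range (nb_max+1):
--         l_sum.append(bin(i+nb_sum)) #add to the list the number made of the sum of the input and the nb_sum
--
--     return l_sum
--
-- def leakage_simu(nb_max,nb_bits,key):
--     data_out=bin_on_nb_bits(nb_bits,function_add(nb_max,nb_bits,key))  #choose if function used is add
--
--     leakage_simu=[]
--
--     for i in range (len(data_out)):
--         l=0
--
--         for j in range (len(data_out[i])):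
--             l=l+ int(data_out[i][-j])#add 1 if bit is equal to 1
--
--         leakage_simu.append(l)# l correponds to hamming weight of data_out[i]
--     return (leakage_simu) #return leakage_simu for each input, the first number coresponds to the leakage_simu of 0
-- ===== SOURCE B (Python) =====
-- def leakage_simu(nb_max, nb_bits, key):
--     # Hamming weight of (key+i) truncated to nb_bits, computed arithmetically:
--     # mask with 2**nb_bits and take the integer popcount -- no binary strings at all.
--     return [((key + i) % (1 << nb_bits)).bit_count() for i in range(nb_max + 1)]
-- ===== Notes on version B (the rewrite author's own statement) =====
-- stated objective: faster
-- what changed: A formats each key+i as a binary string, pads/truncates it and sums its digit characters one by one; B replaces all string processing by integer arithmetic: mask with (key+i) % 2**nb_bits and take the builtin popcount.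
-- outside the precondition, e.g. on leakage_simu(2, 0, 1): A returns [1, 1, 2], B returns [0, 0, 0]
import Mathlib
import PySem

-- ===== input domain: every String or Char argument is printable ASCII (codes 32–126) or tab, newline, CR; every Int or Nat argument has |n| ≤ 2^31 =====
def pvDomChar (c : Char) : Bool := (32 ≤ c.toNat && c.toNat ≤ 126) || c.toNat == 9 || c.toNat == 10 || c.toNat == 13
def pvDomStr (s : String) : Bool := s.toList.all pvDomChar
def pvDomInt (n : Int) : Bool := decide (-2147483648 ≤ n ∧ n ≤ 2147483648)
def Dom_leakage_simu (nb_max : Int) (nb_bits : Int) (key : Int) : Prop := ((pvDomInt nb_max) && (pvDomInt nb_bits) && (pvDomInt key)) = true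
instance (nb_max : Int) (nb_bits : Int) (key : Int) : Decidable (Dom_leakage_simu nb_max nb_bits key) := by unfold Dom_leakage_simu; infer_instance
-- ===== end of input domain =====

-- B replaces A's per-element binary-string formatting, padding/truncation and character-by-character
-- digit summing by integer arithmetic: mask with 2**nb_bits, then integer popcount.

-- ===== PORT A =====
-- Strings are carried as List Char (each PySem.Str op is its PySem.Chars/List op on .toList).

-- the body of bin_on_nb_bits' for-loop, applied to one element e
def pv_bin_one (nb_bits : Int) (e0 : List Char) : List Char :=
  let e1 := PySem.List.slice e0 (some 2) none                    -- e = e[2:]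
  -- (nb_bits-len(e))*"0" : Python string repetition; List.replicate (·.toNat) is exact (count < 0 gives "")
  let e2 := if nb_bits > PySem.List.len e1 then
              List.replicate (nb_bits - PySem.List.len e1).toNat '0' ++ e1
            else e1
  if PySem.List.len e2 > nb_bits then PySem.List.slice e2 (some (-nb_bits)) none else e2

-- helper bin_on_nb_bits(nb_bits, l_in): the for/append loop over l_in is the map of its body
def pv_bin_on_nb_bits (nb_bits : Int) (l_in : List (List Char)) : List (List Char) :=
  l_in.map (pv_bin_one nb_bits)

-- helper function_add(nb_max, nb_bits, nb_sum): append loop = map; bin(x) = PySem.Int.toBinChars0b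
def pv_function_add (nb_max : Int) (nb_bits : Int) (nb_sum : Int) : List (List Char) :=
  (PySem.List.pyRange 0 (nb_max + 1) 1).map (fun i => PySem.Int.toBinChars0b (i + nb_sum))

-- inner loop 'for j in range(len(cs)): l += int(cs[-j])'; int(single char) = PySem.Int.ofChars?;
-- .getD 0 is exact under Pre_ (there every looked-up character is a decimal digit, so int() returns)
def pv_hw_loop (cs : List Char) : Int :=
  (PySem.List.pyRange 0 (PySem.List.len cs) 1).foldl
    (fun l j => l + (PySem.Int.ofChars? [PySem.List.pyGetD cs (-j) ' ']).getD 0) 0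

def leakage_simu (nb_max : Int) (nb_bits : Int) (key : Int) : List Int :=
  let data_out := pv_bin_on_nb_bits nb_bits (pv_function_add nb_max nb_bits key)
  (PySem.List.pyRange 0 (PySem.List.len data_out) 1).map
    (fun i => pv_hw_loop (PySem.List.pyGetD data_out i []))

-- ===== PORT B =====
-- [( (key+i) % (1 << nb_bits) ).bit_count() for i in range(nb_max+1)]
-- 1 << nb_bits: Python raises for nb_bits < 0; under Pre_ the shift is only reached with nb_bits ≥ 1,
-- where <<< nb_bits.toNat is exact. bit_count() = PySem.Int.bitCount.
def leakage_simu_alt (nb_max : Int) (nb_bits : Int) (key : Int) : List Int :=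
  (PySem.List.pyRange 0 (nb_max + 1) 1).map
    (fun i => (PySem.Int.bitCount (PySem.Int.mod (key + i) ((1 : Int) <<< nb_bits.toNat)) : Int))

-- ===== PRECONDITION & SPEC =====
-- Pre_ excludes (a) key < 0 with a nonempty range, where A raises ValueError (bin() of a negative
-- number leaves '-'/'b' characters that reach int()), and (b) nb_bits ≤ 0 with a nonempty range,
-- outside the natural domain (a bit width), where A's value is an artefact of Python's s[-0:]/negative
-- slicing (e.g. nb_bits = 0 performs no truncation at all).
def Pre_leakage_simu (nb_max : Int) (nb_bits : Int) (key : Int) : Prop :=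
  nb_max + 1 ≤ 0 ∨ (1 ≤ nb_bits ∧ 0 ≤ key)
instance (nb_max : Int) (nb_bits : Int) (key : Int) : Decidable (Pre_leakage_simu nb_max nb_bits key) := by unfold Pre_leakage_simu; infer_instance
def pvWitness_leakage_simu : Int × Int × Int := (3, 4, 5)

def Spec_leakage_simu (nb_max : Int) (nb_bits : Int) (key : Int) (out : List Int) : Prop := out = leakage_simu_alt nb_max nb_bits key
instance (nb_max : Int) (nb_bits : Int) (key : Int) (out : List Int) : Decidable (Spec_leakage_simu nb_max nb_bits key out) := by unfold Spec_leakage_simu; infer_instance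

-- ===== CLAIM (what is proved, stated in full; the proofs are below) =====
def Claim_equal_leakage_simu : Prop := ∀ (nb_max : Int) (nb_bits : Int) (key : Int), Dom_leakage_simu nb_max nb_bits key → Pre_leakage_simu nb_max nb_bits key → Spec_leakage_simu nb_max nb_bits key (leakage_simu nb_max nb_bits key)

-- ===== LEMMAS AND PROOFS =====

-- digit value of one character as A's int() sees it, and the digit sum of a char list
def pvDigitVal (c : Char) : Int := (PySem.Int.ofChars? [c]).getD 0
def pvDigitSum (cs : List Char) : Int := (cs.map pvDigitVal).sum

lemma pvDigitSum_append (xs ys : List Char) :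
    pvDigitSum (xs ++ ys) = pvDigitSum xs + pvDigitSum ys := by
  simp [pvDigitSum]

lemma pvDigitSum_replicate_zero (k : Nat) : pvDigitSum (List.replicate k '0') = 0 := by
  induction k with
  | zero => simp [pvDigitSum]
  | succ k ih =>
    rw [List.replicate_succ]
    have h0 : pvDigitVal '0' = 0 := by decide
    simp only [pvDigitSum, List.map_cons, List.sum_cons] at ih ⊢
    rw [ih, h0, add_zero]

-- the binary digits of n, MSB first (what Nat.toDigits 2 produces), in provable form
def pvBits (n : Nat) : List Char :=
  if n < 2 then [Nat.digitChar n] else pvBits (n / 2) ++ [Nat.digitChar (n % 2)]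
decreasing_by exact Nat.div_lt_self (by omega) (by omega)

lemma pvBits_ne_nil (n : Nat) : pvBits n ≠ [] := by
  unfold pvBits; split <;> simp

lemma toDigitsCore_eq_pvBits (f : Nat) : ∀ (n : Nat) (ds : List Char), n < 2 ^ (f + 1) →
    Nat.toDigitsCore 2 (f + 1) n ds = pvBits n ++ ds := by
  induction f with
  | zero =>
    intro n ds h
    have hn : n < 2 := by simpa using h
    unfold Nat.toDigitsCore pvBits
    have : n / 2 = 0 := Nat.div_eq_of_lt hn
    simp [this, hn, Nat.mod_eq_of_lt hn]
  | succ f ih =>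
    intro n ds h
    by_cases hn : n < 2
    · unfold Nat.toDigitsCore pvBits
      have : n / 2 = 0 := Nat.div_eq_of_lt hn
      simp [this, hn, Nat.mod_eq_of_lt hn]
    · have hd : n / 2 ≠ 0 := by omega
      have hlt : n / 2 < 2 ^ (f + 1) := Nat.div_lt_of_lt_mul (by
        have h2 : (2:Nat) ^ (f + 1 + 1) = 2 * 2 ^ (f + 1) := by ring
        omega)
      conv_lhs => unfold Nat.toDigitsCore
      simp only [hd, if_false]
      rw [ih (n / 2) _ hlt]
      conv_rhs => unfold pvBits
      simp [hn]

lemma toDigits_eq_pvBits (n : Nat) : Nat.toDigits 2 n = pvBits n := by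
  have h : n < 2 ^ (n + 1) :=
    lt_trans Nat.lt_two_pow_self (Nat.pow_lt_pow_right (by omega) (by omega))
  simpa using toDigitsCore_eq_pvBits n n [] h

-- n is bounded by 2 ^ (number of its binary digits)
lemma pvBits_lt (n : Nat) : n < 2 ^ (pvBits n).length := by
  by_cases hn : n < 2
  · rw [pvBits, if_pos hn]; simpa using hn
  · have ih := pvBits_lt (n / 2)
    conv_rhs => rw [pvBits, if_neg hn]
    simp only [List.length_append, List.length_singleton]
    have h2 : 2 ^ ((pvBits (n / 2)).length + 1) = 2 ^ (pvBits (n / 2)).length * 2 := by ring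
    omega
  termination_by n
  decreasing_by exact Nat.div_lt_self (by omega) (by omega)

-- split n mod 2^(B+1) at the low bit
lemma pv_low_split (n m : Nat) (hm : 0 < m) : n % (2 * m) = 2 * (n / 2 % m) + n % 2 := by
  conv_lhs => rw [← Nat.div_add_mod n 2]
  rw [Nat.add_mod, Nat.mul_mod_mul_left]
  have h1 : n / 2 % m < m := Nat.mod_lt _ hm
  have h2 : n % 2 < 2 := Nat.mod_lt _ (by omega)
  rw [Nat.mod_eq_of_lt (show n % 2 < 2 * m by omega), Nat.mod_eq_of_lt (by omega)]

-- digit sum of the last B binary digits of n = popcount of n mod 2^B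
lemma pvDigitSum_drop (n : Nat) : ∀ B : Nat,
    pvDigitSum ((pvBits n).drop ((pvBits n).length - B)) =
      (PySem.Int.bitCount ((n % 2 ^ B : Nat) : Int) : Int) := by
  intro B
  by_cases hn : n < 2
  · have hbits : pvBits n = [Nat.digitChar n] := by rw [pvBits, if_pos hn]
    rw [hbits]
    match B with
    | 0 => simp [pvDigitSum]
    | B + 1 =>
      have hm : n % 2 ^ (B + 1) = n := Nat.mod_eq_of_lt (by
        have h2 : (2:Nat) ≤ 2 ^ (B + 1) := Nat.one_lt_two_pow (by omega)
        omega)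
      rw [hm]
      have h0 : 1 - (B + 1) = 0 := by omega
      simp only [List.length_singleton, h0, List.drop_zero]
      interval_cases n <;> simp [pvDigitSum] <;> decide
  · have ih := pvDigitSum_drop (n / 2)
    have hbits : pvBits n = pvBits (n / 2) ++ [Nat.digitChar (n % 2)] := by
      conv_lhs => rw [pvBits, if_neg hn]
    have hpre := pvBits_ne_nil (n / 2)
    rw [hbits]
    match B with
    | 0 =>
      have hnil : (pvBits (n / 2) ++ [Nat.digitChar (n % 2)]).drop
          ((pvBits (n / 2) ++ [Nat.digitChar (n % 2)]).length - 0) = [] :=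
        List.drop_eq_nil_of_le (by omega)
      rw [hnil]
      simp [pvDigitSum]
    | B + 1 =>
      have hv : pvDigitVal (Nat.digitChar (n % 2)) = ((n % 2 : Nat) : Int) := by
        have h2 : n % 2 < 2 := Nat.mod_lt _ (by omega)
        interval_cases h : n % 2 <;> decide
      by_cases hB : B + 1 ≤ (pvBits (n / 2)).length
      · have hdrop : (pvBits (n / 2) ++ [Nat.digitChar (n % 2)]).drop
            ((pvBits (n / 2) ++ [Nat.digitChar (n % 2)]).length - (B + 1)) =
            (pvBits (n / 2)).drop ((pvBits (n / 2)).length - B) ++ [Nat.digitChar (n % 2)] := by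
          rw [List.length_append, List.length_singleton,
            List.drop_append_of_le_length (by omega)]
          congr 2
          omega
        rw [hdrop, pvDigitSum_append, ih B]
        have harith : n % 2 ^ (B + 1) = 2 * (n / 2 % 2 ^ B) + n % 2 := by
          rw [show (2:Nat) ^ (B + 1) = 2 * 2 ^ B by ring]
          exact pv_low_split n (2 ^ B) (Nat.two_pow_pos _)
        have hsum : pvDigitSum [Nat.digitChar (n % 2)] = ((n % 2 : Nat) : Int) := by
          simp [pvDigitSum, hv]
        rw [hsum]
        by_cases hz : n % 2 ^ (B + 1) = 0
        · have hq : n / 2 % 2 ^ B = 0 := by omega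
          have hr : n % 2 = 0 := by omega
          rw [hz, hq, hr]
          simp [PySem.Int.bitCount_zero]
        · have hdiv : n % 2 ^ (B + 1) / 2 = n / 2 % 2 ^ B := by omega
          have hmod : n % 2 ^ (B + 1) % 2 = n % 2 := by omega
          conv_rhs => rw [PySem.Int.bitCount_natCast (show 0 < n % 2 ^ (B + 1) by omega), hdiv, hmod]
          push_cast
          ring
      · have h0 : (pvBits (n / 2) ++ [Nat.digitChar (n % 2)]).length - (B + 1) = 0 := by
          simp only [List.length_append, List.length_singleton]; omega
        rw [h0, List.drop_zero, pvDigitSum_append]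
        have hwhole := ih (pvBits (n / 2)).length
        rw [Nat.sub_self, List.drop_zero] at hwhole
        have hq : n / 2 % 2 ^ (pvBits (n / 2)).length = n / 2 :=
          Nat.mod_eq_of_lt (pvBits_lt (n / 2))
        rw [hq] at hwhole
        have hsum : pvDigitSum [Nat.digitChar (n % 2)] = ((n % 2 : Nat) : Int) := by
          simp [pvDigitSum, hv]
        rw [hwhole, hsum]
        have hm : n % 2 ^ (B + 1) = n := Nat.mod_eq_of_lt (by
          have h1 := pvBits_lt n
          rw [hbits] at h1
          simp only [List.length_append, List.length_singleton] at h1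
          have h2 : (2:Nat) ^ ((pvBits (n / 2)).length + 1) ≤ 2 ^ (B + 1) :=
            Nat.pow_le_pow_right (by omega) (by omega)
          omega)
        rw [hm]
        conv_rhs => rw [PySem.Int.bitCount_natCast (show 0 < n by omega)]
        push_cast
        ring
  termination_by n
  decreasing_by exact Nat.div_lt_self (by omega) (by omega)

-- the inner -j indexing loop visits every character exactly once
lemma pv_neg_index_list (c : Char) (t : List Char) :
    (List.range (c :: t).length).map (fun (j : Nat) => PySem.List.pyGetD (c :: t) (-(j : Int)) ' ') =
      c :: t.reverse := by
  apply List.ext_getElem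
  · simp
  · intro i hi hi'
    simp only [List.getElem_map, List.getElem_range]
    match i with
    | 0 => simp [PySem.List.pyGetD_zero_cons]
    | k + 1 =>
      have hlen : k < t.length := by
        simp only [List.length_map, List.length_range, List.length_cons] at hi
        omega
      have := PySem.List.pyGetD_neg_natCast (c :: t) (k + 1) ' '
        (by omega) (by simp only [List.length_cons]; omega)
      push_cast at this ⊢
      rw [this]
      simp only [List.length_cons, List.getElem_cons, List.getElem_reverse]
      have hne : t.length + 1 - (k + 1) ≠ 0 := by omega
      rw [dif_neg hne]
      congr 1
      omega

lemma pv_hw_loop_eq (cs : List Char) (h : cs ≠ []) : pv_hw_loop cs = pvDigitSum cs := by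
  obtain ⟨c, t, rfl⟩ := List.exists_cons_of_ne_nil h
  unfold pv_hw_loop
  rw [PySem.List.len_eq, PySem.List.pyRange_zero_natCast, List.foldl_map,
    PySem.List.foldl_add, zero_add]
  have h3 : (List.map (fun (y : Nat) =>
        (PySem.Int.ofChars? [PySem.List.pyGetD (c :: t) (-(y : Int)) ' ']).getD 0)
        (List.range (c :: t).length)).sum =
      pvDigitSum ((List.range (c :: t).length).map
        (fun (j : Nat) => PySem.List.pyGetD (c :: t) (-(j : Int)) ' ')) := by
    simp only [pvDigitSum, List.map_map]
    rfl
  rw [h3, pv_neg_index_list]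
  simp [pvDigitSum]

-- one element: A's string pipeline computes popcount((key+i) mod 2^nb_bits)
lemma pv_elem (B : Int) (hB : 1 ≤ B) (m : Nat) :
    pv_hw_loop (pv_bin_one B (PySem.Int.toBinChars0b (m : Int))) =
      (PySem.Int.bitCount (PySem.Int.mod (m : Int) ((1 : Int) <<< B.toNat)) : Int) := by
  have h0b : PySem.Int.toBinChars0b (m : Int) = '0' :: 'b' :: pvBits m := by
    unfold PySem.Int.toBinChars0b
    rw [if_neg (by omega)]
    simp [toDigits_eq_pvBits]
  have hR : PySem.Int.mod (m : Int) ((1 : Int) <<< B.toNat) = ((m % 2 ^ B.toNat : Nat) : Int) := by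
    rw [Int.shiftLeft_eq, one_mul]
    have : ((2 : Int) ^ B.toNat) = ((2 ^ B.toNat : Nat) : Int) := by push_cast; ring
    rw [this, PySem.Int.mod_natCast]
  rw [hR]
  have hslice : PySem.List.slice ('0' :: 'b' :: pvBits m) (some 2) none = pvBits m := by
    rw [PySem.List.slice_from ('0' :: 'b' :: pvBits m) (show (0:Int) ≤ 2 by norm_num)]
    rfl
  rw [h0b]
  simp only [pv_bin_one, hslice, PySem.List.len_eq]
  set L := (pvBits m).length with hL
  have hL1 : 0 < L := List.length_pos_of_ne_nil (pvBits_ne_nil m)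
  by_cases hpad : B > (L : Int)
  · rw [if_pos hpad]
    have hlen2 : (((List.replicate (B - (L : Int)).toNat '0' ++ pvBits m).length : Nat) : Int) = B := by
      simp only [List.length_append, List.length_replicate]
      push_cast
      omega
    rw [hlen2, if_neg (lt_irrefl B)]
    rw [pv_hw_loop_eq _ (by simp [pvBits_ne_nil m]), pvDigitSum_append,
      pvDigitSum_replicate_zero, zero_add]
    have hmm : m % 2 ^ B.toNat = m := Nat.mod_eq_of_lt
      (lt_of_lt_of_le (pvBits_lt m) (Nat.pow_le_pow_right (by omega) (by omega)))
    have := pvDigitSum_drop m L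
    rw [Nat.sub_self, List.drop_zero, Nat.mod_eq_of_lt (pvBits_lt m)] at this
    rw [hmm, this]
  · rw [if_neg hpad]
    by_cases htr : (L : Int) > B
    · rw [if_pos htr]
      have hBN : B = ((B.toNat : Nat) : Int) := by omega
      have hslice2 : PySem.List.slice (pvBits m) (some (-B)) none =
          (pvBits m).drop ((pvBits m).length - B.toNat) := by
        conv_lhs => rw [hBN]
        exact PySem.List.slice_from_neg_natCast _ _ (by omega)
      rw [hslice2]
      have hne : (pvBits m).drop (L - B.toNat) ≠ [] := by
        apply List.ne_nil_of_length_pos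
        rw [List.length_drop]
        omega
      rw [pv_hw_loop_eq _ hne]
      exact pvDigitSum_drop m B.toNat
    · rw [if_neg htr]
      have hEq : L = B.toNat := by omega
      rw [pv_hw_loop_eq _ (pvBits_ne_nil m)]
      have := pvDigitSum_drop m B.toNat
      rw [← hEq, Nat.sub_self, List.drop_zero, hEq] at this
      exact this

-- ===== VERDICT (by name: the statement is the Claim_ definition above) =====
theorem leakage_simu_spec : Claim_equal_leakage_simu := by
  intro nb_max nb_bits key _ hpre
  unfold Spec_leakage_simu leakage_simu leakage_simu_alt
  by_cases h0 : nb_max + 1 ≤ 0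
  · rw [PySem.List.pyRange_one_eq_nil h0]
    simp [pv_bin_on_nb_bits, pv_function_add, PySem.List.pyRange_one_eq_nil h0,
      PySem.List.len_eq, PySem.List.pyRange_one_eq_nil (le_refl (0 : Int))]
  · obtain ⟨hB, hk⟩ := hpre.resolve_left h0
    rw [show (PySem.List.pyRange 0 (PySem.List.len
        (pv_bin_on_nb_bits nb_bits (pv_function_add nb_max nb_bits key))) 1).map
        (fun i => pv_hw_loop (PySem.List.pyGetD
          (pv_bin_on_nb_bits nb_bits (pv_function_add nb_max nb_bits key)) i [])) =
        ((PySem.List.pyRange 0 (PySem.List.len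
          (pv_bin_on_nb_bits nb_bits (pv_function_add nb_max nb_bits key))) 1).map
          (fun i => PySem.List.pyGetD
            (pv_bin_on_nb_bits nb_bits (pv_function_add nb_max nb_bits key)) i [])).map
          pv_hw_loop from by rw [List.map_map]; rfl]
    rw [PySem.List.map_pyGetD_pyRange_zero]
    unfold pv_bin_on_nb_bits pv_function_add
    rw [List.map_map, List.map_map]
    apply List.map_congr_left
    intro i hi
    have hi0 : 0 ≤ i := ((PySem.List.mem_pyRange_one).mp hi).1
    have hik : 0 ≤ i + key := by omega
    have hm : i + key = (((i + key).toNat : Nat) : Int) := by omega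
    simp only [Function.comp]
    rw [hm, pv_elem nb_bits hB, show key + i = (((i + key).toNat : Nat) : Int) by omega]
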